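-- pv_equiv track=rewrite | github.com/taegyunjjang/Question-Answering-for-Natural_Questions | preprocess.py | char_to_word_offset
-- ===== SOURCE A (Python) =====
-- def char_to_word_offset(contexts, offset):
--     offset = []
--     doc_tokens = []
--     prev_is_whitespace = True
--
--     def is_whitespace(c):
--         return c in " \t\r\n" or ord(c) == 0x202F
--
--     for i, c in enumerate(contexts):
--         if is_whitespace(c):
--             prev_is_whitespace = True
--         else:
--             if prev_is_whitespace:
--                 doc_tokens.append(c)
--             else:
--                 doc_tokens[-1] += c
--             prev_is_whitespace = False
--         offset.append(len(doc_tokens) - 1)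
--
--     return offset
-- ===== SOURCE B (Python) =====
-- def char_to_word_offset(contexts, offset):
--     def is_whitespace(c):
--         return c in " \t\r\n" or ord(c) == 0x202F
--
--     # 1 exactly where a new word starts: non-whitespace char preceded by
--     # whitespace (a sentinel space is prepended so index 0 counts too).
--     starts = [(not is_whitespace(c)) and is_whitespace(p)
--               for p, c in zip(" " + contexts, contexts)]
--
--     out = []
--     total = -1
--     for s in starts:
--         total += s
--         out.append(total)
--     return out
-- ===== Notes on version B (the rewrite author's own statement) =====
-- stated objective: alternative
-- what changed: Instead of maintaining the list of word tokens and mutating its last element, B computes a 0/1 word-start indicator per char (by zipping the string with itself shifted by a sentinel space) and emits its running prefix sum started at -1.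
import Mathlib
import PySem

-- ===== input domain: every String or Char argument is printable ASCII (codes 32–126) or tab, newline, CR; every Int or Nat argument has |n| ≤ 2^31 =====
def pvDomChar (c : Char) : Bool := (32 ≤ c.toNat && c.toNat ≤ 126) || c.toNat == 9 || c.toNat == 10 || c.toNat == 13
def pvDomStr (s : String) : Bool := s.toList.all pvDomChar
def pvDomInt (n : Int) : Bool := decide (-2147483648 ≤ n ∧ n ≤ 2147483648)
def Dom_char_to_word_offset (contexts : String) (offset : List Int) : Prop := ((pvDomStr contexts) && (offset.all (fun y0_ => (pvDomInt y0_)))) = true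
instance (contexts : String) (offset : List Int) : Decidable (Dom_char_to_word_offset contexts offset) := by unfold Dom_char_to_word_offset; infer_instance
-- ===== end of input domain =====

-- B replaces A's token-list bookkeeping by a word-start indicator list plus a prefix sum (alternative decomposition, same return value).


-- ===== PORT A =====
-- is_whitespace(c): c in " \t\r\n" or ord(c) == 0x202F
def pvIsWs (c : Char) : Bool :=
  c == ' ' || c == '\t' || c == '\r' || c == '\n' || c.toNat == 0x202F

-- doc_tokens[-1] += c  (A never reaches this with an empty list; [] case is unreachable)
def pvAppendLast (toks : List Char) (c : Char) : List (List Char) → List (List Char)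
  | [] => []
  | [t] => [t ++ [c]]
  | t :: rest => t :: pvAppendLast toks c rest

-- the for-loop of A: state = (doc_tokens, prev_is_whitespace); emits len(doc_tokens)-1 per char
def pvALoop : List Char → List (List Char) → Bool → List Int
  | [], _, _ => []
  | c :: rest, toks, prev =>
    if pvIsWs c then
      ((toks.length : Int) - 1) :: pvALoop rest toks true
    else
      let toks' := if prev then toks ++ [[c]] else pvAppendLast [] c toks
      ((toks'.length : Int) - 1) :: pvALoop rest toks' false

def char_to_word_offset (contexts : String) (offset : List Int) : List Int :=
  pvALoop contexts.toList [] true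

-- ===== PORT B =====
-- starts = [(not is_whitespace(c)) and is_whitespace(p) for p, c in zip(" " + contexts, contexts)]
def pvStarts (cs : List Char) : List Bool :=
  ((' ' :: cs).zip cs).map (fun pc => !pvIsWs pc.2 && pvIsWs pc.1)

-- the prefix-sum loop: total starts at -1, out.append(total) after total += s
def pvBLoop : List Bool → Int → List Int
  | [], _ => []
  | s :: rest, total =>
    let t := total + (if s then 1 else 0)
    t :: pvBLoop rest t

def char_to_word_offset_alt (contexts : String) (offset : List Int) : List Int :=
  pvBLoop (pvStarts contexts.toList) (-1)

-- ===== PRECONDITION & SPEC =====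
def Spec_char_to_word_offset (contexts : String) (offset : List Int) (out : List Int) : Prop := out = char_to_word_offset_alt contexts offset
instance (contexts : String) (offset : List Int) (out : List Int) : Decidable (Spec_char_to_word_offset contexts offset out) := by unfold Spec_char_to_word_offset; infer_instance

-- ===== CLAIM (what is proved, stated in full; the proofs are below) =====
def Claim_equal_char_to_word_offset : Prop := ∀ (contexts : String) (offset : List Int), Dom_char_to_word_offset contexts offset → Spec_char_to_word_offset contexts offset (char_to_word_offset contexts offset)

-- ===== LEMMAS AND PROOFS =====

theorem pvAppendLast_length (c : Char) (toks : List (List Char)) :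
    (pvAppendLast [] c toks).length = toks.length := by
  induction toks with
  | nil => rfl
  | cons t rest ih =>
    cases rest with
    | nil => rfl
    | cons u us => simpa [pvAppendLast] using ih

-- core invariant: A's loop output equals B's prefix sum, where p is the "previous char"
-- (so prev_is_whitespace = pvIsWs p) and total = doc_tokens.length - 1.
theorem pvLoop_eq (cs : List Char) : ∀ (p : Char) (toks : List (List Char)),
    pvALoop cs toks (pvIsWs p)
      = pvBLoop (((p :: cs).zip cs).map (fun pc => !pvIsWs pc.2 && pvIsWs pc.1))
          ((toks.length : Int) - 1) := by
  induction cs with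
  | nil => intro p toks; rfl
  | cons c rest ih =>
    intro p toks
    by_cases hc : pvIsWs c
    · have := ih c toks
      rw [hc] at this
      simp [pvALoop, pvBLoop, hc, this]
    · by_cases hp : pvIsWs p
      · have := ih c (toks ++ [[c]])
        simp [hc] at this
        simp [pvALoop, pvBLoop, hc, hp, this]
      · have := ih c (pvAppendLast [] c toks)
        simp [hc] at this
        simp [pvALoop, pvBLoop, hc, hp, this, pvAppendLast_length]

-- ===== VERDICT (by name: the statement is the Claim_ definition above) =====
theorem char_to_word_offset_spec : Claim_equal_char_to_word_offset := by
  intro contexts offset _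
  unfold Spec_char_to_word_offset char_to_word_offset char_to_word_offset_alt pvStarts
  have h := pvLoop_eq contexts.toList ' ' []
  simpa using h
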